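-- pv_equiv track=rewrite | github.com/realZillionX/VideoThinkBench | data/visual/rects/generator.py | _subtract_intervals
-- ===== SOURCE A (Python) =====
-- from typing import List, Optional, Sequence, Tuple
--
-- def _subtract_intervals(segments: List[Tuple[int, int]], cut: Tuple[int, int]) -> List[Tuple[int, int]]:
--     a, b = cut
--     if b <= a:
--         return segments
--     out: List[Tuple[int, int]] = []
--     for s0, s1 in segments:
--         if s1 <= a or s0 >= b:
--             out.append((s0, s1))
--             continue
--         if s0 < a:
--             out.append((s0, a))
--         if b < s1:
--             out.append((b, s1))
--     return [(u0, u1) for (u0, u1) in out if u1 > u0]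
-- ===== SOURCE B (Python) =====
-- def _subtract_intervals(segments, cut):
--     a, b = cut
--     if b <= a:
--         return segments
--
--     def pieces(s0, s1):
--         # partition the segment at the cut endpoints falling strictly inside it,
--         # then keep the adjacent pieces that are nonempty and lie outside [a, b)
--         cuts = [s0] + [p for p in (a, b) if s0 < p < s1] + [s1]
--         return [(u, v) for u, v in zip(cuts, cuts[1:]) if v > u and (v <= a or u >= b)]
--
--     return [piece for s0, s1 in segments for piece in pieces(s0, s1)]
-- ===== Notes on version B (the rewrite author's own statement) =====
-- stated objective: alternative
-- what changed: Instead of A's disjoint/overlap branch analysis building remnants plus a trailing length filter, B partitions each segment at the cut endpoints lying strictly inside it into up to three consecutive pieces (zipping the cut-point list with its tail) and keeps exactly the nonempty pieces outside the cut, collected by a flat comprehension.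
import Mathlib
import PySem

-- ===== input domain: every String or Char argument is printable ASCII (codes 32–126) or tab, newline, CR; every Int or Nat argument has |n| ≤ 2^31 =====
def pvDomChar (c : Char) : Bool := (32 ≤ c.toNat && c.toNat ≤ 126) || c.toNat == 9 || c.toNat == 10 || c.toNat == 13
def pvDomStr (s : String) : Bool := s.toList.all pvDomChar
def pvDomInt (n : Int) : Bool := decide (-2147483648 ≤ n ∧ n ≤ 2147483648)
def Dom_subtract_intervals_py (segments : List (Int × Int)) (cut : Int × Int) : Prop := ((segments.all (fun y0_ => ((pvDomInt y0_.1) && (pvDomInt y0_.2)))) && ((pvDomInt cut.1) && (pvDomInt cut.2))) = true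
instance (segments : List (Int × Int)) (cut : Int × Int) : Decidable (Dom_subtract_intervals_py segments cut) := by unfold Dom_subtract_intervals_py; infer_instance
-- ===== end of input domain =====

-- B partitions each segment at the inner cut endpoints and keeps the nonempty pieces outside the cut (objective: alternative decomposition, same cost).


-- ===== PORT A =====
-- one loop step of A: branch on disjoint vs overlap, append the remnant pieces
def subA (a b : Int) (out : List (Int × Int)) (p : Int × Int) : List (Int × Int) :=
  if p.2 ≤ a ∨ p.1 ≥ b then out ++ [p]
  else
    let out := if p.1 < a then out ++ [(p.1, a)] else out
    if b < p.2 then out ++ [(b, p.2)] else out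

def subtract_intervals_py (segments : List (Int × Int)) (cut : Int × Int) : List (Int × Int) :=
  let a := cut.1
  let b := cut.2
  if b ≤ a then segments
  else
    let out := segments.foldl (subA a b) []
    out.filter (fun u => u.2 > u.1)

-- ===== PORT B =====
-- B's helper: split the segment at the cut endpoints strictly inside it,
-- then keep the adjacent pieces that are nonempty and lie outside [a, b)
def piecesB (a b s0 s1 : Int) : List (Int × Int) :=
  let cuts := [s0] ++ ([a, b].filter (fun p => s0 < p ∧ p < s1)) ++ [s1]
  (cuts.zip cuts.tail).filter (fun u => u.2 > u.1 ∧ (u.2 ≤ a ∨ u.1 ≥ b))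

def subtract_intervals_py_alt (segments : List (Int × Int)) (cut : Int × Int) : List (Int × Int) :=
  let a := cut.1
  let b := cut.2
  if b ≤ a then segments
  else segments.flatMap (fun p => piecesB a b p.1 p.2)

-- ===== PRECONDITION & SPEC =====
def Spec_subtract_intervals_py (segments : List (Int × Int)) (cut : Int × Int) (out : List (Int × Int)) : Prop := out = subtract_intervals_py_alt segments cut
instance (segments : List (Int × Int)) (cut : Int × Int) (out : List (Int × Int)) : Decidable (Spec_subtract_intervals_py segments cut out) := by unfold Spec_subtract_intervals_py; infer_instance

-- ===== CLAIM (what is proved, stated in full; the proofs are below) =====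
def Claim_equal_subtract_intervals_py : Prop := ∀ (segments : List (Int × Int)) (cut : Int × Int), Dom_subtract_intervals_py segments cut → Spec_subtract_intervals_py segments cut (subtract_intervals_py segments cut)

-- ===== LEMMAS AND PROOFS =====

-- evaluate B's partition-and-filter helper into explicit pieces (proof-side characterisation)
theorem piecesB_eq (a b s0 s1 : Int) (hab : a < b) :
    piecesB a b s0 s1 =
      if s1 ≤ a ∨ s0 ≥ b then (if s0 < s1 then [(s0, s1)] else [])
      else (if s0 < a then [(s0, a)] else []) ++ (if b < s1 then [(b, s1)] else []) := by
  unfold piecesB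
  cases hA : decide (s0 < a ∧ a < s1) <;> cases hB : decide (s0 < b ∧ b < s1) <;>
    simp only [decide_eq_true_eq, decide_eq_false_iff_not, not_and, not_lt] at hA hB <;>
    simp only [List.filter_cons, List.filter_nil, hA, hB, decide_eq_true_eq, List.cons_append,
      List.nil_append, List.zip, List.tail] <;>
    split_ifs <;> simp_all <;> omega

-- filtering A's step result by positive length appends exactly B's pieces of that segment
theorem step_pieces (a b : Int) (hab : a < b) (out : List (Int × Int)) (p : Int × Int) :
    (subA a b out p).filter (fun u => u.2 > u.1) =
      out.filter (fun u => u.2 > u.1) ++ piecesB a b p.1 p.2 := by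
  obtain ⟨s0, s1⟩ := p
  rw [piecesB_eq a b s0 s1 hab]
  simp only [subA]
  split_ifs <;>
    simp_all only [List.filter_append, List.filter_cons, List.filter_nil, decide_eq_true_eq,
      List.append_nil, List.append_assoc, List.append_cancel_left_eq, gt_iff_lt] <;>
    split_ifs <;> first | rfl | omega | simp_all

theorem fold_pieces (a b : Int) (hab : a < b) (segments out : List (Int × Int)) :
    (segments.foldl (subA a b) out).filter (fun u => u.2 > u.1) =
      out.filter (fun u => u.2 > u.1) ++ segments.flatMap (fun p => piecesB a b p.1 p.2) := by
  induction segments generalizing out with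
  | nil => simp
  | cons p rest ih =>
      simp only [List.foldl_cons, List.flatMap_cons]
      rw [ih, step_pieces a b hab, List.append_assoc]

-- ===== VERDICT (by name: the statement is the Claim_ definition above) =====
theorem subtract_intervals_py_spec : Claim_equal_subtract_intervals_py := by
  intro segments cut _
  unfold Spec_subtract_intervals_py subtract_intervals_py subtract_intervals_py_alt
  by_cases h : cut.2 ≤ cut.1
  · simp [h]
  · simp only [h, if_false]
    simpa using fold_pieces cut.1 cut.2 (by omega) segments []
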